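-- pv_equiv track=rewrite | github.com/EliyahuAI/mcp-server-hyperplexity | src/the_clone/search_manager.py | _extract_snippet_structure
-- ===== SOURCE A (Python) =====
-- def _extract_snippet_structure(snippet: str) -> str:
--     """
--     Extract headings + first/last sentence per section from snippet.
--
--     Args:
--         snippet: Full text snippet from search result
--
--     Returns:
--         Formatted string with headings and key sentences
--     """
--     if not snippet:
--         return ""
--
--     lines = snippet.split('\n')
--     extracted = []
--     current_section = []
--
--     for line in lines:
--         line = line.strip()
--         if not line:
--             # Empty line - might be section boundary
--             if current_section:
--                 # Extract first and last sentence from section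
--                 section_text = ' '.join(current_section)
--                 sentences = [s.strip() for s in section_text.split('. ') if s.strip()]
--                 if sentences:
--                     if len(sentences) == 1:
--                         extracted.append(f"  - {sentences[0]}")
--                     else:
--                         extracted.append(f"  - {sentences[0]}")
--                         if sentences[-1] != sentences[0]:
--                             extracted.append(f"  - ... {sentences[-1]}")
--                 current_section = []
--             continue
--
--         # Check if line looks like a heading (short, possibly ends with :, or all caps)
--         is_heading = (
--             len(line) < 80 and
--             (line.endswith(':') or line.isupper() or
--              (len(line.split()) < 10 and not line.endswith('.')))
--         )
--
--         if is_heading: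
--             # Save previous section
--             if current_section:
--                 section_text = ' '.join(current_section)
--                 sentences = [s.strip() for s in section_text.split('. ') if s.strip()]
--                 if sentences:
--                     if len(sentences) == 1:
--                         extracted.append(f"  - {sentences[0]}")
--                     else:
--                         extracted.append(f"  - {sentences[0]}")
--                         if sentences[-1] != sentences[0]:
--                             extracted.append(f"  - ... {sentences[-1]}")
--                 current_section = []
--
--             # Add heading
--             extracted.append(f"\n**{line}**")
--         else:
--             current_section.append(line)
--
--     # Process last section
--     if current_section:
--         section_text = ' '.join(current_section)
--         sentences = [s.strip() for s in section_text.split('. ') if s.strip()]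
--         if sentences:
--             if len(sentences) == 1:
--                 extracted.append(f"  - {sentences[0]}")
--             else:
--                 extracted.append(f"  - {sentences[0]}")
--                 if sentences[-1] != sentences[0]:
--                     extracted.append(f"  - ... {sentences[-1]}")
--
--     return '\n'.join(extracted) if extracted else snippet[:500]  # Fallback to first 500 chars
-- ===== SOURCE B (Python) =====
-- def _extract_snippet_structure(snippet: str) -> str:
--     """Two-pass re-implementation: tokenize into heading/body segments, then render."""
--     if not snippet:
--         return ""
--
--     # Pass 1: segment the lines into tokens.
--     tokens = []
--     group = []
--     for raw in snippet.split('\n'):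
--         line = raw.strip()
--         if not line:
--             if group:
--                 tokens.append(('body', group))
--                 group = []
--             continue
--         if len(line) < 80 and (line.endswith(':') or line.isupper() or
--                                (len(line.split()) < 10 and not line.endswith('.'))):
--             if group:
--                 tokens.append(('body', group))
--                 group = []
--             tokens.append(('heading', line))
--         else:
--             group.append(line)
--     if group:
--         tokens.append(('body', group))
--
--     # Pass 2: render the tokens.
--     out = []
--     for kind, val in tokens:
--         if kind == 'heading':
--             out.append("\n**%s**" % val)
--         else:
--             sentences = [s.strip() for s in ' '.join(val).split('. ') if s.strip()]
--             if sentences: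
--                 out.append("  - %s" % sentences[0])
--                 if len(sentences) > 1 and sentences[-1] != sentences[0]:
--                     out.append("  - ... %s" % sentences[-1])
--     return '\n'.join(out) if out else snippet[:500]
-- ===== Notes on version B (the rewrite author's own statement) =====
-- stated objective: alternative
-- what changed: A interleaves section flushing and formatting inside one stateful line loop (the flush code pasted three times); B first tokenizes the lines into a list of ('heading', line) / ('body', lines) segments and then renders that token list in a separate pass.
import Mathlib
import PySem

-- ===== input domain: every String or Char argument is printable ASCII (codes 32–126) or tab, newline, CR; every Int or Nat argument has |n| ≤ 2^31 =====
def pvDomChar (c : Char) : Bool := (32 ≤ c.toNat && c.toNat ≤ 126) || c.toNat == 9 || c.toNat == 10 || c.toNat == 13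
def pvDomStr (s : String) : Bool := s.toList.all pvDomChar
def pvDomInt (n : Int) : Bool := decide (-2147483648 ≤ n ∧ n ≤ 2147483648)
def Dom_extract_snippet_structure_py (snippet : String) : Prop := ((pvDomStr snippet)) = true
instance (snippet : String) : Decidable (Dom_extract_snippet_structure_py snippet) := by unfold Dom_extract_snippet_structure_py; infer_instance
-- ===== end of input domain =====

-- B replaces A's single stateful line loop (with its thrice-pasted flush code) by a
-- tokenize-then-render decomposition; objective: alternative (same asymptotic cost).


-- str.isupper(), ported by hand (PySem has only the Char form): at least one cased
-- character and no lowercase cased character; exact on the ASCII domain.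
def pyStrIsupper (s : String) : Bool :=
  s.toList.any (fun c => PySem.Chars.isalpha c) &&
  s.toList.all (fun c => !(PySem.Chars.islower c))

-- ===== PORT A =====
-- the flush code A pastes three times: section_text / sentences / the appended bullets
def flushA (current_section : List String) : List String :=
  let section_text := PySem.Str.join " " current_section
  let sentences := (((PySem.Str.split? section_text ". ").getD []).map PySem.Str.strip).filter
      (fun s => s ≠ "")
  if sentences ≠ [] then
    if sentences.length == 1 then
      ["  - " ++ sentences.headI]
    else
      ["  - " ++ sentences.headI] ++
        (if sentences.getLastD "" ≠ sentences.headI then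
          ["  - ... " ++ sentences.getLastD ""] else [])
  else []

def stepA (st : List String × List String) (raw : String) : List String × List String :=
  let line := PySem.Str.strip raw
  if line = "" then
    (if st.2 ≠ [] then (st.1 ++ flushA st.2, []) else st)
  else
    let is_heading :=
      decide (PySem.Str.len line < 80) &&
        (PySem.Str.endswith line ":" || pyStrIsupper line ||
          (decide ((PySem.Str.split₀ line).length < 10) && !(PySem.Str.endswith line ".")))
    if is_heading then
      ((if st.2 ≠ [] then st.1 ++ flushA st.2 else st.1) ++ ["\n**" ++ line ++ "**"], [])
    else
      (st.1, st.2 ++ [line])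

def extract_snippet_structure_py (snippet : String) : String :=
  if snippet = "" then ""
  else
    let lines := (PySem.Str.split? snippet "\n").getD []
    let st := lines.foldl stepA ([], [])
    let extracted := if st.2 ≠ [] then st.1 ++ flushA st.2 else st.1
    if extracted ≠ [] then PySem.Str.join "\n" extracted
    else PySem.Str.slice snippet none (some 500)

-- ===== PORT B =====
inductive SnipTok where
  | heading : String → SnipTok
  | body : List String → SnipTok
deriving DecidableEq, Repr

-- pass 1: segment the stripped lines into heading / body tokens
def tokenizeB : List String → List String → List SnipTok
  | [], group => if group ≠ [] then [SnipTok.body group] else []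
  | raw :: rest, group =>
    let line := PySem.Str.strip raw
    if line = "" then
      if group ≠ [] then SnipTok.body group :: tokenizeB rest []
      else tokenizeB rest group
    else if decide (PySem.Str.len line < 80) &&
        (PySem.Str.endswith line ":" || pyStrIsupper line ||
          (decide ((PySem.Str.split₀ line).length < 10) && !(PySem.Str.endswith line "."))) then
      (if group ≠ [] then [SnipTok.body group] else []) ++
        SnipTok.heading line :: tokenizeB rest []
    else
      tokenizeB rest (group ++ [line])

-- pass 2: render one token
def renderB : SnipTok → List String
  | SnipTok.heading line => ["\n**" ++ line ++ "**"]
  | SnipTok.body val =>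
    let sentences := (((PySem.Str.split? (PySem.Str.join " " val) ". ").getD []).map
        PySem.Str.strip).filter (fun s => s ≠ "")
    if sentences ≠ [] then
      ("  - " ++ sentences.headI) ::
        (if decide (1 < sentences.length) && decide (sentences.getLastD "" ≠ sentences.headI) then
          ["  - ... " ++ sentences.getLastD ""] else [])
    else []

def extract_snippet_structure_py_alt (snippet : String) : String :=
  if snippet = "" then ""
  else
    let out := (tokenizeB ((PySem.Str.split? snippet "\n").getD []) []).flatMap renderB
    if out ≠ [] then PySem.Str.join "\n" out
    else PySem.Str.slice snippet none (some 500)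

-- ===== PRECONDITION & SPEC =====
def Spec_extract_snippet_structure_py (snippet : String) (out : String) : Prop := out = extract_snippet_structure_py_alt snippet
instance (snippet : String) (out : String) : Decidable (Spec_extract_snippet_structure_py snippet out) := by unfold Spec_extract_snippet_structure_py; infer_instance

-- ===== CLAIM (what is proved, stated in full; the proofs are below) =====
def Claim_equal_extract_snippet_structure_py : Prop := ∀ (snippet : String), Dom_extract_snippet_structure_py snippet → Spec_extract_snippet_structure_py snippet (extract_snippet_structure_py snippet)

-- ===== LEMMAS AND PROOFS =====

-- A's flush of a group is exactly B's rendering of the corresponding body token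
theorem flushA_eq_renderB (g : List String) : flushA g = renderB (SnipTok.body g) := by
  simp only [flushA, renderB]
  rcases (((PySem.Str.split? (PySem.Str.join " " g) ". ").getD []).map
      PySem.Str.strip).filter (fun s => s ≠ "") with _ | ⟨a, _ | ⟨b, t⟩⟩
  · simp
  · simp
  · simp

theorem renderB_heading (l : String) : renderB (SnipTok.heading l) = ["\n**" ++ l ++ "**"] := rfl

-- loop invariant: A's fold from (ext, cur), followed by the final flush, is
-- ext ++ the rendering of B's tokens of the remaining lines with pending group cur
theorem loop_eq (lines : List String) (ext cur : List String) :
    (let st := lines.foldl stepA (ext, cur)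
     if st.2 = [] then st.1 else st.1 ++ renderB (SnipTok.body st.2)) =
    ext ++ (tokenizeB lines cur).flatMap renderB := by
  induction lines generalizing ext cur with
  | nil =>
    simp only [List.foldl_nil, tokenizeB]
    by_cases h : cur = [] <;> simp [h]
  | cons raw rest ih =>
    simp only [List.foldl_cons, tokenizeB, stepA]
    by_cases hl : PySem.Str.strip raw = ""
    · by_cases hc : cur = [] <;>
        simp [hl, hc, ih, flushA_eq_renderB, List.append_assoc]
    · by_cases hh : (PySem.Chars.strip raw.toList).length < 80 ∧
          ((PySem.Chars.endswith (PySem.Chars.strip raw.toList) [':'] = true ∨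
              pyStrIsupper (PySem.Str.strip raw) = true) ∨
            (PySem.Str.split₀ (PySem.Str.strip raw)).length < 10 ∧
              PySem.Chars.endswith (PySem.Chars.strip raw.toList) ['.'] = false)
      · by_cases hc : cur = [] <;>
          simp [hl, hh, hc, ih, flushA_eq_renderB, renderB_heading, List.append_assoc]
      · simp [hl, hh, ih]

-- ===== VERDICT (by name: the statement is the Claim_ definition above) =====
theorem extract_snippet_structure_py_spec : Claim_equal_extract_snippet_structure_py := by
  intro snippet _
  show _ = _
  unfold extract_snippet_structure_py extract_snippet_structure_py_alt
  by_cases hs : snippet = ""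
  · simp [hs]
  · have h := loop_eq ((PySem.Str.split? snippet "\n").getD []) [] []
    simp only [List.nil_append] at h
    simp [hs, flushA_eq_renderB, h]
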